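-- pv_equiv track=rewrite | github.com/ngminhhieu/triplet_loss | new_cluster.py | merger_group
-- ===== SOURCE A (Python) =====
-- def list_contain_list(sublist, list):
--     return all(sub in list for sub in sublist)
--
-- def merger_group(dict_group):
--     del_key = []
--     for key, values in dict_group.items():
--         for k, v in dict_group.items():
--             if key != k:
--                 if len(values) < len(v) and list_contain_list(values, v):
--                     del_key.append(key)
--                 elif len(v) < len(values) and list_contain_list(v, values):
--                     del_key.append(k)
--     for key in set(del_key):
--         del dict_group[key]
--     return dict_group
-- ===== SOURCE B (Python) =====
-- def merger_group(dict_group):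
--     # inverted index: value -> set of keys whose list contains it
--     index = {}
--     for k, vs in dict_group.items():
--         for x in set(vs):
--             index.setdefault(x, set()).add(k)
--     lens = {k: len(vs) for k, vs in dict_group.items()}
--     marked = []
--     for k, vs in dict_group.items():
--         s = set(vs)
--         if not s:
--             if any(l > 0 for l in lens.values()):
--                 marked.append(k)
--         else:
--             it = iter(s)
--             holders = set(index[next(it)])
--             for x in it:
--                 holders &= index[x]
--             if any(lens[kk] > len(vs) for kk in holders):
--                 marked.append(k)
--     for k in marked:
--         del dict_group[k]
--     return dict_group
-- ===== Notes on version B (the rewrite author's own statement) =====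
-- stated objective: alternative
-- what changed: Replaces the all-pairs double dict scan with an inverted index (value -> set of holder keys): each group's superset candidates are found by intersecting the posting sets of its values, then checked against a precomputed length table.
import Mathlib
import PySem

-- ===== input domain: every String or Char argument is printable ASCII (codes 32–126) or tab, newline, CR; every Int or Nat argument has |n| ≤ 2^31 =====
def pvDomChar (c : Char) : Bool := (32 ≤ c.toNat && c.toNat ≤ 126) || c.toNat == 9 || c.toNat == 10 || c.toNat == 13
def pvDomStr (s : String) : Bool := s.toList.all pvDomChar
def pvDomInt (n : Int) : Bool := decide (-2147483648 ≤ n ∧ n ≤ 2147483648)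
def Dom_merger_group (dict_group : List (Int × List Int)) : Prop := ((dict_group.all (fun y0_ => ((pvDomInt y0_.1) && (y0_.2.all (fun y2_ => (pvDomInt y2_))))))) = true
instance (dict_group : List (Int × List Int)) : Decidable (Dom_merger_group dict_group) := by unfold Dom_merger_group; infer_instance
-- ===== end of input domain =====

-- B replaces A's all-pairs scan by an inverted index (value -> set of holder keys) plus a length
-- table; both A and B mutate the Python dict in place the same way, and the equivalence proved
-- here is about the returned dict's items.

-- ===== PORT A =====
-- all(sub in list for sub in sublist)
def pvContain (sub lst : List Int) : Bool := sub.all (fun s => lst.contains s)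

def merger_group (dict_group : List (Int × List Int)) : List (Int × List Int) :=
  let del_key : List Int := dict_group.foldl (fun acc kv =>
    dict_group.foldl (fun acc2 kv2 =>
      if kv.1 ≠ kv2.1 then
        if kv.2.length < kv2.2.length && pvContain kv.2 kv2.2 then acc2 ++ [kv.1]
        else if kv2.2.length < kv.2.length && pvContain kv2.2 kv.2 then acc2 ++ [kv2.1]
        else acc2
      else acc2) acc) []
  dict_group.filter (fun kv => !((PySem.Set.ofList del_key).contains kv.1))

-- ===== PORT B =====
-- inverted index: value -> set of keys whose list contains it
def pvIndex (d : List (Int × List Int)) : PySem.Dict Int (PySem.Set Int) :=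
  d.foldl (fun idx kv =>
    (PySem.Set.ofList kv.2).foldl (fun idx2 x =>
      idx2.insert x (PySem.Set.add (idx2.getD x PySem.Set.empty) kv.1)) idx) PySem.Dict.empty

-- lens = {k: len(vs) for k, vs in dict_group.items()}
def pvLens (d : List (Int × List Int)) : PySem.Dict Int Int :=
  d.foldl (fun m kv => m.insert kv.1 (kv.2.length : Int)) PySem.Dict.empty

def merger_group_alt (dict_group : List (Int × List Int)) : List (Int × List Int) :=
  let index := pvIndex dict_group
  let lens := pvLens dict_group
  let marked : List Int := dict_group.foldl (fun acc kv =>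
    match PySem.Set.ofList kv.2 with
    | [] => if lens.values.any (fun l => decide (0 < l)) then acc ++ [kv.1] else acc
    | x :: rest =>
      -- index[x] never raises here: every value of the current group is indexed (getD is exact)
      let holders := rest.foldl (fun h y => PySem.Set.inter h (index.getD y PySem.Set.empty))
                       (index.getD x PySem.Set.empty)
      if holders.any (fun kk => decide ((kv.2.length : Int) < lens.getD kk 0)) then acc ++ [kv.1]
      else acc) []
  dict_group.filter (fun kv => !(marked.contains kv.1))

-- ===== PRECONDITION & SPEC =====
-- Pre_ states the Python dict representation invariant: the association list stands for a dict,
-- whose keys are necessarily distinct; lists with duplicate keys denote no Python input at all.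
def Pre_merger_group (dict_group : List (Int × List Int)) : Prop :=
  (dict_group.map Prod.fst).Nodup

instance (dict_group : List (Int × List Int)) : Decidable (Pre_merger_group dict_group) := by
  unfold Pre_merger_group; infer_instance

def pvWitness_merger_group : (List (Int × List Int)) := [(0, [1]), (1, [1, 2]), (2, [])]

def Spec_merger_group (dict_group : List (Int × List Int)) (out : List (Int × List Int)) : Prop := out = merger_group_alt dict_group
instance (dict_group : List (Int × List Int)) (out : List (Int × List Int)) : Decidable (Spec_merger_group dict_group out) := by unfold Spec_merger_group; infer_instance

-- ===== CLAIM (what is proved, stated in full; the proofs are below) =====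
def Claim_equal_merger_group : Prop := ∀ (dict_group : List (Int × List Int)), Dom_merger_group dict_group → Pre_merger_group dict_group → Spec_merger_group dict_group (merger_group dict_group)

-- ===== LEMMAS AND PROOFS =====

-- what A appends for an ordered pair of entries
def pvG (kv kv2 : Int × List Int) : List Int :=
  if kv.1 ≠ kv2.1 then
    if kv.2.length < kv2.2.length && pvContain kv.2 kv2.2 then [kv.1]
    else if kv2.2.length < kv.2.length && pvContain kv2.2 kv.2 then [kv2.1]
    else []
  else []

theorem delkey_eq (d : List (Int × List Int)) :
    d.foldl (fun acc kv =>
      d.foldl (fun acc2 kv2 =>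
        if kv.1 ≠ kv2.1 then
          if kv.2.length < kv2.2.length && pvContain kv.2 kv2.2 then acc2 ++ [kv.1]
          else if kv2.2.length < kv.2.length && pvContain kv2.2 kv.2 then acc2 ++ [kv2.1]
          else acc2
        else acc2) acc) ([] : List Int)
    = d.flatMap (fun kv => d.flatMap (pvG kv)) := by
  have h1 : ∀ kv acc, d.foldl (fun acc2 kv2 =>
        if kv.1 ≠ kv2.1 then
          if kv.2.length < kv2.2.length && pvContain kv.2 kv2.2 then acc2 ++ [kv.1]
          else if kv2.2.length < kv.2.length && pvContain kv2.2 kv.2 then acc2 ++ [kv2.1]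
          else acc2
        else acc2) acc = acc ++ d.flatMap (pvG kv) := by
    intro kv acc
    rw [← PySem.List.foldl_append_eq_flatMap]
    congr 1
    funext acc2 kv2
    simp only [pvG]
    split
    · split
      · simp
      · split <;> simp
    · simp
  have h2 : (fun (acc : List Int) kv => d.foldl (fun acc2 kv2 =>
        if kv.1 ≠ kv2.1 then
          if kv.2.length < kv2.2.length && pvContain kv.2 kv2.2 then acc2 ++ [kv.1]
          else if kv2.2.length < kv.2.length && pvContain kv2.2 kv.2 then acc2 ++ [kv2.1]
          else acc2
        else acc2) acc) = (fun acc kv => acc ++ d.flatMap (pvG kv)) :=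
    funext fun acc => funext fun kv => h1 kv acc
  rw [h2, PySem.List.foldl_append_eq_flatMap]
  simp

theorem mem_delkey (d : List (Int × List Int)) (x : Int) :
    x ∈ d.flatMap (fun kv => d.flatMap (pvG kv)) ↔
    ∃ p ∈ d, ∃ q ∈ d, p.1 ≠ q.1 ∧ p.2.length < q.2.length ∧ pvContain p.2 q.2 = true ∧ x = p.1 := by
  simp only [List.mem_flatMap]
  constructor
  · rintro ⟨kv, hkv, kv2, hkv2, hx⟩
    unfold pvG at hx
    split_ifs at hx with hne h1 h2 <;>
      simp only [List.mem_singleton, List.not_mem_nil] at hx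
    · simp only [Bool.and_eq_true, decide_eq_true_eq] at h1
      exact ⟨kv, hkv, kv2, hkv2, hne, h1.1, h1.2, hx⟩
    · simp only [Bool.and_eq_true, decide_eq_true_eq] at h2
      exact ⟨kv2, hkv2, kv, hkv, Ne.symm hne, h2.1, h2.2, hx⟩
  · rintro ⟨p, hp, q, hq, hne, hlen, hcon, rfl⟩
    refine ⟨p, hp, q, hq, ?_⟩
    unfold pvG
    simp [hne, hlen, hcon]

theorem mem_getD_inner (k : Int) (xs : List Int) (idx : PySem.Dict Int (PySem.Set Int)) (y kk : Int) :
    kk ∈ (xs.foldl (fun idx2 x =>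
      idx2.insert x (PySem.Set.add (idx2.getD x PySem.Set.empty) k)) idx).getD y PySem.Set.empty ↔
    kk ∈ idx.getD y PySem.Set.empty ∨ (y ∈ xs ∧ kk = k) := by
  induction xs generalizing idx with
  | nil => simp
  | cons x xs ih =>
    simp only [List.foldl_cons, ih, PySem.Dict.getD_insert, List.mem_cons]
    by_cases hyx : y = x
    · subst hyx
      simp [PySem.Set.mem_add]
      tauto
    · simp [hyx]

theorem mem_pvIndex_aux (l : List (Int × List Int)) (idx : PySem.Dict Int (PySem.Set Int)) (y kk : Int) :
    kk ∈ (l.foldl (fun idx kv =>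
      (PySem.Set.ofList kv.2).foldl (fun idx2 x =>
        idx2.insert x (PySem.Set.add (idx2.getD x PySem.Set.empty) kv.1)) idx) idx).getD y PySem.Set.empty ↔
    kk ∈ idx.getD y PySem.Set.empty ∨ ∃ q ∈ l, q.1 = kk ∧ y ∈ q.2 := by
  induction l generalizing idx with
  | nil => simp
  | cons kv l ih =>
    simp only [List.foldl_cons, ih, mem_getD_inner, PySem.Set.mem_ofList, List.mem_cons]
    constructor
    · rintro (((h | ⟨hy, rfl⟩) ) | ⟨q, hq, rfl, hyq⟩)
      · exact Or.inl h
      · exact Or.inr ⟨kv, Or.inl rfl, rfl, hy⟩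
      · exact Or.inr ⟨q, Or.inr hq, rfl, hyq⟩
    · rintro (h | ⟨q, (rfl | hq), rfl, hyq⟩)
      · exact Or.inl (Or.inl h)
      · exact Or.inl (Or.inr ⟨hyq, rfl⟩)
      · exact Or.inr ⟨q, hq, rfl, hyq⟩

theorem mem_pvIndex (d : List (Int × List Int)) (y kk : Int) :
    kk ∈ (pvIndex d).getD y PySem.Set.empty ↔ ∃ q ∈ d, q.1 = kk ∧ y ∈ q.2 := by
  unfold pvIndex
  rw [mem_pvIndex_aux]
  simp [PySem.Dict.empty, PySem.Dict.getD, PySem.Dict.get?, PySem.Set.empty]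

theorem pvLens_eq (d : List (Int × List Int)) (h : (d.map Prod.fst).Nodup) :
    pvLens d = PySem.Dict.mk (d.map (fun kv => (kv.1, (kv.2.length : Int)))) := by
  apply PySem.Dict.ext
  unfold pvLens
  rw [PySem.Dict.items_foldl_insert_fresh]
  · simp [PySem.Dict.empty]
  · intro a _; rfl
  · exact h

theorem values_pvLens (d : List (Int × List Int)) (h : (d.map Prod.fst).Nodup) :
    (pvLens d).values = d.map (fun kv => (kv.2.length : Int)) := by
  rw [pvLens_eq d h]
  simp [PySem.Dict.values]

theorem getD_pvLens (d : List (Int × List Int)) (h : (d.map Prod.fst).Nodup)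
    (q : Int × List Int) (hq : q ∈ d) : (pvLens d).getD q.1 0 = (q.2.length : Int) := by
  rw [pvLens_eq d h]
  induction d with
  | nil => cases hq
  | cons kv d ih =>
    simp only [List.map_cons]
    rw [PySem.Dict.getD, PySem.Dict.get?_mk_cons]
    rcases List.mem_cons.1 hq with rfl | hq'
    · simp
    · have hne : kv.1 ≠ q.1 := by
        simp only [List.map_cons, List.nodup_cons] at h
        intro he
        exact h.1 (he ▸ List.mem_map_of_mem hq')
      simp only [beq_iff_eq, hne, if_false]
      have := ih (by simpa using (List.nodup_cons.1 (by simpa using h)).2) hq'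
      rw [PySem.Dict.getD] at this
      exact this

-- uniqueness of an entry by its key under Nodup keys
theorem entry_unique {d : List (Int × List Int)} (h : (d.map Prod.fst).Nodup)
    {p q : Int × List Int} (hp : p ∈ d) (hq : q ∈ d) (he : p.1 = q.1) : p = q := by
  have := List.inj_on_of_nodup_map h hp hq he
  exact this

-- what B appends for one entry
def pvBG (d : List (Int × List Int)) (kv : Int × List Int) : List Int :=
  match PySem.Set.ofList kv.2 with
  | [] => if (pvLens d).values.any (fun l => decide (0 < l)) then [kv.1] else []
  | x :: rest =>
    if (rest.foldl (fun h y => PySem.Set.inter h ((pvIndex d).getD y PySem.Set.empty))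
         ((pvIndex d).getD x PySem.Set.empty)).any
        (fun kk => decide ((kv.2.length : Int) < (pvLens d).getD kk 0)) then [kv.1] else []

theorem marked_eq (d : List (Int × List Int)) :
    d.foldl (fun acc kv =>
      match PySem.Set.ofList kv.2 with
      | [] => if (pvLens d).values.any (fun l => decide (0 < l)) then acc ++ [kv.1] else acc
      | x :: rest =>
        let holders := rest.foldl (fun h y => PySem.Set.inter h ((pvIndex d).getD y PySem.Set.empty))
                         ((pvIndex d).getD x PySem.Set.empty)
        if holders.any (fun kk => decide ((kv.2.length : Int) < (pvLens d).getD kk 0)) then acc ++ [kv.1]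
        else acc) ([] : List Int)
    = d.flatMap (pvBG d) := by
  have h2 : (fun (acc : List Int) kv =>
      match PySem.Set.ofList kv.2 with
      | [] => if (pvLens d).values.any (fun l => decide (0 < l)) then acc ++ [kv.1] else acc
      | x :: rest =>
        let holders := rest.foldl (fun h y => PySem.Set.inter h ((pvIndex d).getD y PySem.Set.empty))
                         ((pvIndex d).getD x PySem.Set.empty)
        if holders.any (fun kk => decide ((kv.2.length : Int) < (pvLens d).getD kk 0)) then acc ++ [kv.1]
        else acc) = (fun acc kv => acc ++ pvBG d kv) := by
    funext acc kv
    simp only [pvBG]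
    rcases h : PySem.Set.ofList kv.2 with _ | ⟨x, rest⟩ <;> split <;> split <;> simp
  rw [h2, PySem.List.foldl_append_eq_flatMap]
  simp

-- membership in the folded intersection
theorem mem_inter_foldl (f : Int → PySem.Set Int) (rest : List Int) (s : PySem.Set Int) (kk : Int) :
    kk ∈ rest.foldl (fun h y => PySem.Set.inter h (f y)) s ↔ kk ∈ s ∧ ∀ y ∈ rest, kk ∈ f y := by
  induction rest generalizing s with
  | nil => simp
  | cons y rest ih =>
    simp only [List.foldl_cons, ih, PySem.Set.mem_inter, List.mem_cons]
    constructor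
    · rintro ⟨⟨hs, hy⟩, hrest⟩
      exact ⟨hs, fun z hz => hz.elim (fun hz => hz ▸ hy) (hrest z)⟩
    · rintro ⟨hs, hall⟩
      exact ⟨⟨hs, hall y (Or.inl rfl)⟩, fun z hz => hall z (Or.inr hz)⟩

theorem ofList_eq_nil {xs : List Int} (h : PySem.Set.ofList xs = []) : xs = [] := by
  cases xs with
  | nil => rfl
  | cons x xs =>
    have : x ∈ PySem.Set.ofList (x :: xs) := (PySem.Set.mem_ofList _ _).2 (List.mem_cons_self ..)
    rw [h] at this
    cases this

-- B marks exactly the A-condition for an entry of d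
theorem pvBG_iff (d : List (Int × List Int)) (h : (d.map Prod.fst).Nodup)
    (kv : Int × List Int) (x : Int) :
    x ∈ pvBG d kv ↔ (∃ q ∈ d, kv.2.length < q.2.length ∧ pvContain kv.2 q.2 = true) ∧ x = kv.1 := by
  unfold pvBG
  rcases hs : PySem.Set.ofList kv.2 with _ | ⟨v, rest⟩
  · have h2 : kv.2 = [] := ofList_eq_nil hs
    rw [values_pvLens d h]
    constructor
    · intro hx
      split_ifs at hx with hany
      · simp only [List.mem_singleton] at hx
        simp only [List.any_eq_true, List.mem_map, decide_eq_true_eq] at hany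
        obtain ⟨_, ⟨q, hq, rfl⟩, hpos⟩ := hany
        refine ⟨⟨q, hq, ?_, ?_⟩, hx⟩
        · rw [h2]; simpa using hpos
        · simp [pvContain, h2]
      · cases hx
    · rintro ⟨⟨q, hq, hlen, _⟩, rfl⟩
      have : (List.map (fun kv => ((kv.2.length : Int))) d).any (fun l => decide (0 < l)) = true := by
        simp only [List.any_eq_true, List.mem_map, decide_eq_true_eq]
        exact ⟨(q.2.length : Int), ⟨q, hq, rfl⟩, by exact_mod_cast Nat.lt_of_le_of_lt (Nat.zero_le _) hlen⟩
      simp [this]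
  · simp only [hs]
    constructor
    · intro hx
      split_ifs at hx with hany
      · simp only [List.mem_singleton] at hx
        simp only [List.any_eq_true, decide_eq_true_eq] at hany
        obtain ⟨kk, hkk, hlt⟩ := hany
        rw [mem_inter_foldl] at hkk
        have hall : ∀ y ∈ kv.2, kk ∈ (pvIndex d).getD y PySem.Set.empty := by
          intro y hy
          have hy' : y ∈ PySem.Set.ofList kv.2 := (PySem.Set.mem_ofList _ _).2 hy
          rw [hs] at hy'
          rcases List.mem_cons.1 hy' with rfl | hy''
          · exact hkk.1
          · exact hkk.2 y hy''
        have hv : v ∈ kv.2 := by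
          have : v ∈ PySem.Set.ofList kv.2 := by rw [hs]; exact List.mem_cons_self ..
          exact (PySem.Set.mem_ofList _ _).1 this
        obtain ⟨q, hq, hqk, _⟩ := (mem_pvIndex d v kk).1 (hall v hv)
        have hcon : pvContain kv.2 q.2 = true := by
          simp only [pvContain, List.all_eq_true]
          intro y hy
          obtain ⟨q', hq', hq'k, hyq'⟩ := (mem_pvIndex d y kk).1 (hall y hy)
          have : q' = q := entry_unique h hq' hq (by rw [hq'k, hqk])
          subst this
          simpa using hyq'
        have hlen : kv.2.length < q.2.length := by
          rw [← hqk, getD_pvLens d h q hq] at hlt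
          exact_mod_cast hlt
        exact ⟨⟨q, hq, hlen, hcon⟩, hx⟩
      · cases hx
    · rintro ⟨⟨q, hq, hlen, hcon⟩, rfl⟩
      have hall : ∀ y ∈ kv.2, q.1 ∈ (pvIndex d).getD y PySem.Set.empty := by
        intro y hy
        refine (mem_pvIndex d y q.1).2 ⟨q, hq, rfl, ?_⟩
        simp only [pvContain, List.all_eq_true] at hcon
        simpa using hcon y hy
      have hmem : ∀ y ∈ PySem.Set.ofList kv.2, y ∈ kv.2 := fun y hy => (PySem.Set.mem_ofList _ _).1 hy
      have hany : ((rest.foldl (fun h y => PySem.Set.inter h ((pvIndex d).getD y PySem.Set.empty))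
          ((pvIndex d).getD v PySem.Set.empty)).any
          (fun kk => decide ((kv.2.length : Int) < (pvLens d).getD kk 0))) = true := by
        simp only [List.any_eq_true, decide_eq_true_eq]
        refine ⟨q.1, ?_, ?_⟩
        · rw [mem_inter_foldl]
          constructor
          · exact hall v (hmem v (by rw [hs]; exact List.mem_cons_self ..))
          · intro y hy
            exact hall y (hmem y (by rw [hs]; exact List.mem_cons.2 (Or.inr hy)))
        · rw [getD_pvLens d h q hq]
          exact_mod_cast hlen
      simpa using hany

-- ===== VERDICT (by name: the statement is the Claim_ definition above) =====
theorem merger_group_spec : Claim_equal_merger_group := by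
  intro d _ hpre
  simp only [Spec_merger_group, merger_group, merger_group_alt]
  rw [delkey_eq, marked_eq]
  apply List.filter_congr
  intro kv hkv
  congr 1
  have hA : ((PySem.Set.ofList (d.flatMap fun kv => d.flatMap (pvG kv))).contains kv.1) = true ↔
      ∃ q ∈ d, kv.1 ≠ q.1 ∧ kv.2.length < q.2.length ∧ pvContain kv.2 q.2 = true := by
    rw [PySem.Set.contains]
    simp only [List.contains_iff_mem, PySem.Set.mem_ofList]
    rw [mem_delkey]
    constructor
    · rintro ⟨p, hp, q, hq, hne, hlen, hcon, he⟩
      have : p = kv := entry_unique hpre hp hkv he.symm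
      subst this
      exact ⟨q, hq, hne, hlen, hcon⟩
    · rintro ⟨q, hq, hne, hlen, hcon⟩
      exact ⟨kv, hkv, q, hq, hne, hlen, hcon, rfl⟩
  have hB : ((d.flatMap (pvBG d)).contains kv.1) = true ↔
      ∃ q ∈ d, kv.2.length < q.2.length ∧ pvContain kv.2 q.2 = true := by
    simp only [List.contains_iff_mem, List.mem_flatMap]
    constructor
    · rintro ⟨p, hp, hx⟩
      obtain ⟨⟨q, hq, hlen, hcon⟩, he⟩ := (pvBG_iff d hpre p kv.1).1 hx
      have : p = kv := entry_unique hpre hp hkv he.symm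
      subst this
      exact ⟨q, hq, hlen, hcon⟩
    · rintro ⟨q, hq, hlen, hcon⟩
      exact ⟨kv, hkv, (pvBG_iff d hpre kv kv.1).2 ⟨⟨q, hq, hlen, hcon⟩, rfl⟩⟩
  have hside : (∃ q ∈ d, kv.1 ≠ q.1 ∧ kv.2.length < q.2.length ∧ pvContain kv.2 q.2 = true) ↔
      ∃ q ∈ d, kv.2.length < q.2.length ∧ pvContain kv.2 q.2 = true := by
    constructor
    · rintro ⟨q, hq, _, hlen, hcon⟩; exact ⟨q, hq, hlen, hcon⟩
    · rintro ⟨q, hq, hlen, hcon⟩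
      refine ⟨q, hq, fun he => ?_, hlen, hcon⟩
      have : kv = q := entry_unique hpre hkv hq he
      subst this
      exact Nat.lt_irrefl _ hlen
  rw [Bool.eq_iff_iff, hA, hB]
  exact hside
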